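-- pv_equiv track=rewrite | github.com/MKindberg/puzzles | adv20/14.py | add_mem
-- ===== SOURCE A (Python) =====
-- import itertools
--
-- def add_mem(mem, mask, addr, val):
--     new_val = []
--     bin_val = bin(val)[2:]
--     masked = itertools.zip_longest(bin_val[::-1], mask[::-1], fillvalue = '0')
--     for m in masked:
--         if m[1] == 'X':
--             new_val.append(m[0])
--         else:
--             new_val.append(m[1])
--     mem[addr] = int(''.join(new_val[::-1]), 2)
--     return mem
-- ===== SOURCE B (Python) =====
-- def add_mem(mem, mask, addr, val):
--     and_mask = int(mask.replace('X', '1') or '0', 2)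
--     or_mask = int(mask.replace('X', '0') or '0', 2)
--     mem[addr] = (val & and_mask) | or_mask
--     return mem
-- ===== Notes on version B (the rewrite author's own statement) =====
-- stated objective: idiomatic
-- what changed: B precomputes an AND mask (X->1) and an OR mask (X->0) from the mask string and stores (val & and_mask) | or_mask, replacing A's per-bit zip_longest loop, list building and string reassembly with two integer masks and one bitwise expression.
-- outside the precondition, e.g. on add_mem({}, 'XX', 0, -3): A returns {0: 3}, B returns {0: 1}; on add_mem({}, 'X_X', 0, 5): A returns {0: 3}, B returns {0: 1}
import Mathlib
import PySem

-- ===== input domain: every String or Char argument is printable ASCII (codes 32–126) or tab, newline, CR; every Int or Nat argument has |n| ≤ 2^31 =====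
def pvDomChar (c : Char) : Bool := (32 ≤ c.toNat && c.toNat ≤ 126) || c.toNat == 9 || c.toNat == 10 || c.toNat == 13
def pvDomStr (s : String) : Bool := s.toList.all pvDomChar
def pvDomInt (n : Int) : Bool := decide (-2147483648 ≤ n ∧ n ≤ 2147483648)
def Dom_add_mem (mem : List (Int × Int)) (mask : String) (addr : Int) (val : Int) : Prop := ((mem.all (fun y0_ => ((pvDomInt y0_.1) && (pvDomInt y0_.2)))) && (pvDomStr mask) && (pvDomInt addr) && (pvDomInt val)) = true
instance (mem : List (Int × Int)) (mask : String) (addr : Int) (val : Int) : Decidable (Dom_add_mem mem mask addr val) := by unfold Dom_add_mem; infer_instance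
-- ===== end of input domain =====

-- B replaces A's per-bit zip_longest loop and string reassembly by two precomputed
-- integer masks and a single bitwise expression (same in-place mem[addr] mutation as A).

-- ===== PORT A =====
-- little-endian binary digits of a natural number (empty for 0)
def pvNatBitsLE (n : Nat) : List Char :=
  if h : n = 0 then [] else (if n % 2 = 1 then '1' else '0') :: pvNatBitsLE (n / 2)
decreasing_by exact Nat.div_lt_self (Nat.pos_of_ne_zero h) (by norm_num)

-- bin(val)[2:][::-1]: for val < 0, bin gives '-0b…' so [2:] starts with 'b' (kept literally)
def pvBinRev (val : Int) : List Char :=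
  if val = 0 then ['0']
  else if 0 ≤ val then pvNatBitsLE val.toNat
  else pvNatBitsLE (-val).toNat ++ ['b']

-- itertools.zip_longest(xs, ys, fillvalue='0')
def pvZipLongest0 : List Char → List Char → List (Char × Char)
  | [], [] => []
  | a :: as_, [] => (a, '0') :: pvZipLongest0 as_ []
  | [], b :: bs => ('0', b) :: pvZipLongest0 [] bs
  | a :: as_, b :: bs => (a, b) :: pvZipLongest0 as_ bs

-- int(s, 2); exact whenever every char is '0'/'1' and the list is the digits only,
-- which Pre_ guarantees for both ports (no sign/whitespace/underscore handling needed there)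
def pvParse2 (cs : List Char) : Nat :=
  cs.foldl (fun a c => 2 * a + (if c = '1' then 1 else 0)) 0

def add_mem (mem : List (Int × Int)) (mask : String) (addr : Int) (val : Int) : List (Int × Int) :=
  let bin_val_rev := pvBinRev val
  let masked := pvZipLongest0 bin_val_rev mask.toList.reverse
  let new_val := masked.foldl (fun acc m => acc ++ [if m.2 = 'X' then m.1 else m.2]) []
  ((PySem.Dict.mk mem).insert addr ((pvParse2 new_val.reverse : Nat) : Int)).items

-- ===== PORT B =====
-- mask.replace('X', c) done charwise; int(_, 2) via pvParse2 (exact under Pre_, see above);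
-- val & and_mask via Nat &&& (exact since Pre_ gives 0 ≤ val)
def add_mem_alt (mem : List (Int × Int)) (mask : String) (addr : Int) (val : Int) : List (Int × Int) :=
  let and_mask := pvParse2 (mask.toList.map (fun c => if c = 'X' then '1' else c))
  let or_mask := pvParse2 (mask.toList.map (fun c => if c = 'X' then '0' else c))
  ((PySem.Dict.mk mem).insert addr (((val.toNat &&& and_mask) ||| or_mask : Nat) : Int)).items

-- ===== PRECONDITION & SPEC =====
-- Pre_ excludes negative val — where A reads the magnitude digits of bin(val)[2:] and usually
-- raises ValueError on the stray 'b' (otherwise silently drops the sign) — and masks with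
-- characters outside '0'/'1'/'X', where int(...,2) usually raises but accidentally accepts
-- some '_' patterns; A's values on these corners are artefacts of its string manipulation.
def Pre_add_mem (mem : List (Int × Int)) (mask : String) (addr : Int) (val : Int) : Prop :=
  0 ≤ val ∧ mask.toList.all (fun c => c == '0' || c == '1' || c == 'X') = true
instance (mem : List (Int × Int)) (mask : String) (addr : Int) (val : Int) : Decidable (Pre_add_mem mem mask addr val) := by unfold Pre_add_mem; infer_instance

def pvWitness_add_mem : (List (Int × Int)) × String × Int × Int := ([(0, 1)], "X10X", 3, 5)

def Spec_add_mem (mem : List (Int × Int)) (mask : String) (addr : Int) (val : Int) (out : List (Int × Int)) : Prop := out = add_mem_alt mem mask addr val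
instance (mem : List (Int × Int)) (mask : String) (addr : Int) (val : Int) (out : List (Int × Int)) : Decidable (Spec_add_mem mem mask addr val out) := by unfold Spec_add_mem; infer_instance

-- ===== CLAIM (what is proved, stated in full; the proofs are below) =====
def Claim_equal_add_mem : Prop := ∀ (mem : List (Int × Int)) (mask : String) (addr : Int) (val : Int), Dom_add_mem mem mask addr val → Pre_add_mem mem mask addr val → Spec_add_mem mem mask addr val (add_mem mem mask addr val)

-- ===== LEMMAS AND PROOFS =====
-- little-endian value of a '0'/'1' list
def pvVLE : List Char → Nat
  | [] => 0
  | c :: cs => (if c = '1' then 1 else 0) + 2 * pvVLE cs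

theorem pvParse2_reverse (l : List Char) : pvParse2 l.reverse = pvVLE l := by
  unfold pvParse2
  rw [List.foldl_reverse]
  induction l with
  | nil => rfl
  | cons c cs ih => simp [pvVLE, ih]; omega

theorem pvVLE_natBitsLE (n : Nat) : pvVLE (pvNatBitsLE n) = n := by
  fun_induction pvNatBitsLE n with
  | case1 => simp [pvVLE]
  | case2 n h ih =>
    by_cases h2 : n % 2 = 1 <;> simp [pvVLE, ih, h2] <;> omega

theorem pvNatBitsLE_bits (n : Nat) : ∀ c ∈ pvNatBitsLE n, c = '0' ∨ c = '1' := by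
  fun_induction pvNatBitsLE n with
  | case1 => simp
  | case2 n h ih =>
    intro c hc
    rcases List.mem_cons.mp hc with h' | h'
    · subst h'; split <;> simp
    · exact ih c h'

theorem pv_and_two_mul (a b x y : Nat) (hx : x ≤ 1) (hy : y ≤ 1) :
    (x + 2 * a) &&& (y + 2 * b) = (x &&& y) + 2 * (a &&& b) := by
  apply Nat.eq_of_testBit_eq
  intro i
  cases i with
  | zero =>
    simp only [Nat.testBit_zero]
    interval_cases x <;> interval_cases y <;> simp [Nat.add_mul_mod_self_left]
  | succ i =>
    have h3 : x &&& y ≤ 1 := by interval_cases x <;> interval_cases y <;> decide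
    simp only [Nat.testBit_add_one, Nat.and_div_two]
    have h1 : (x + 2 * a) / 2 = a := by omega
    have h2 : (y + 2 * b) / 2 = b := by omega
    have h4 : ((x &&& y) + 2 * (a &&& b)) / 2 = a &&& b := by omega
    rw [h1, h2, h4]

theorem pv_or_two_mul (a b x y : Nat) (hx : x ≤ 1) (hy : y ≤ 1) :
    (x + 2 * a) ||| (y + 2 * b) = (x ||| y) + 2 * (a ||| b) := by
  apply Nat.eq_of_testBit_eq
  intro i
  cases i with
  | zero =>
    simp only [Nat.testBit_zero]
    interval_cases x <;> interval_cases y <;> simp [Nat.add_mul_mod_self_left]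
  | succ i =>
    have h3 : x ||| y ≤ 1 := by interval_cases x <;> interval_cases y <;> decide
    simp only [Nat.testBit_add_one, Nat.or_div_two]
    have h1 : (x + 2 * a) / 2 = a := by omega
    have h2 : (y + 2 * b) / 2 = b := by omega
    have h4 : ((x ||| y) + 2 * (a ||| b)) / 2 = a ||| b := by omega
    rw [h1, h2, h4]

theorem pv_bit_le (P : Prop) [Decidable P] : (if P then 1 else 0 : Nat) ≤ 1 := by
  split <;> omega

theorem pv_step (a b c x y z : Nat) (hx : x ≤ 1) (hy : y ≤ 1) (hz : z ≤ 1) :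
    ((x + 2 * a) &&& (y + 2 * b)) ||| (z + 2 * c) = ((x &&& y) ||| z) + 2 * ((a &&& b) ||| c) := by
  rw [pv_and_two_mul a b x y hx hy,
    pv_or_two_mul (a &&& b) c (x &&& y) z (by interval_cases x <;> interval_cases y <;> decide) hz]

-- the central fact: A's per-bit loop computes (bits & and_mask) | or_mask, little-endian
theorem pv_main (ml : List Char) : ∀ bl : List Char,
    (∀ c ∈ bl, c = '0' ∨ c = '1') → (∀ c ∈ ml, c = '0' ∨ c = '1' ∨ c = 'X') →
    pvVLE ((pvZipLongest0 bl ml).map (fun m => if m.2 = 'X' then m.1 else m.2)) =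
      (pvVLE bl &&& pvVLE (ml.map (fun c => if c = 'X' then '1' else c))) |||
        pvVLE (ml.map (fun c => if c = 'X' then '0' else c)) := by
  induction ml with
  | nil =>
    intro bl hbl _
    simp only [List.map_nil, pvVLE, Nat.and_zero, Nat.zero_or]
    induction bl with
    | nil => simp [pvZipLongest0, pvVLE]
    | cons b bs ih =>
      have ih' := ih (fun c hc => hbl c (List.mem_cons_of_mem _ hc))
      simp [pvZipLongest0, pvVLE, ih']
  | cons m ms ih =>
    intro bl hbl hml
    have hm := hml m (List.mem_cons_self ..)
    have hms : ∀ c ∈ ms, c = '0' ∨ c = '1' ∨ c = 'X' :=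
      fun c hc => hml c (List.mem_cons_of_mem _ hc)
    cases bl with
    | nil =>
      have ih0 := ih [] (by simp) hms
      rcases hm with hm | hm | hm <;> subst hm <;>
        simp [pvZipLongest0, pvVLE, ih0]
    | cons b bs =>
      have hb := hbl b (List.mem_cons_self ..)
      have ihb := ih bs (fun c hc => hbl c (List.mem_cons_of_mem _ hc)) hms
      simp only [pvZipLongest0, List.map_cons, pvVLE, ihb]
      rw [pv_step _ _ _ _ _ _ (pv_bit_le _) (pv_bit_le _) (pv_bit_le _)]
      congr 1
      rcases hm with hm | hm | hm <;> rcases hb with hb | hb <;> subst hm hb <;> decide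

theorem pvBinRev_bits (val : Int) (h : 0 ≤ val) : ∀ c ∈ pvBinRev val, c = '0' ∨ c = '1' := by
  by_cases h0 : val = 0
  · simp [pvBinRev, h0]
  · simp only [pvBinRev, if_neg h0, if_pos h]
    exact pvNatBitsLE_bits _

theorem pvVLE_binRev (val : Int) (h : 0 ≤ val) : pvVLE (pvBinRev val) = val.toNat := by
  by_cases h0 : val = 0
  · simp [pvBinRev, pvVLE, h0]
  · simp only [pvBinRev, if_neg h0, if_pos h]
    exact pvVLE_natBitsLE _

-- ===== VERDICT (by name: the statement is the Claim_ definition above) =====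
theorem add_mem_spec : Claim_equal_add_mem := by
  intro mem mask addr val _ hpre
  obtain ⟨hval, hmaskb⟩ := hpre
  have hmask : ∀ c ∈ mask.toList, c = '0' ∨ c = '1' ∨ c = 'X' := by
    intro c hc
    have := List.all_eq_true.mp hmaskb c hc
    simp only [Bool.or_eq_true, beq_iff_eq] at this; tauto
  unfold Spec_add_mem
  simp only [_root_.add_mem, add_mem_alt]
  congr 2
  rw [PySem.List.foldl_append_singleton_eq_map, pvParse2_reverse, List.nil_append]
  have hrev : ∀ c ∈ mask.toList.reverse, c = '0' ∨ c = '1' ∨ c = 'X' :=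
    fun c hc => hmask c (List.mem_reverse.mp hc)
  rw [pv_main mask.toList.reverse (pvBinRev val) (pvBinRev_bits val hval) hrev,
    pvVLE_binRev val hval]
  have h1 : pvParse2 (mask.toList.map (fun c => if c = 'X' then '1' else c)) =
      pvVLE (mask.toList.reverse.map (fun c => if c = 'X' then '1' else c)) := by
    rw [← pvParse2_reverse, List.map_reverse, List.reverse_reverse]
  have h0 : pvParse2 (mask.toList.map (fun c => if c = 'X' then '0' else c)) =
      pvVLE (mask.toList.reverse.map (fun c => if c = 'X' then '0' else c)) := by
    rw [← pvParse2_reverse, List.map_reverse, List.reverse_reverse]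
  rw [h1, h0]
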